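-- pv_equiv track=rewrite | github.com/austral-prog/tp-7-Tommolomo | loops_and_print.py | enumerate_backwards
-- ===== SOURCE A (Python) =====
-- def enumerate_backwards(lista2):
--     lista_enu2 = []
--     indice = 0
--     for string in lista2:
--         if string:
--             string_rev = string[::-1]
--             lista_enu2.append(f"{indice}. {string_rev}")
--             indice = indice + 1
--     return lista_enu2
-- ===== SOURCE B (Python) =====
-- def enumerate_backwards(lista2):
--     # Traverse the list in reverse, counting DOWN from the number of
--     # non-empty strings; build the output back-to-front and flip it once.
--     idx = sum(1 for s in lista2 if s)
--     out = []
--     for s in reversed(lista2):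
--         if s:
--             idx -= 1
--             out.append(f"{idx}. {s[::-1]}")
--     out.reverse()
--     return out
-- ===== Notes on version B (the rewrite author's own statement) =====
-- stated objective: alternative
-- what changed: B traverses the list in reverse, derives each index by counting DOWN from the precomputed number of non-empty strings, and builds the output back-to-front with a final reverse, instead of A's forward loop with a count-up counter.
import Mathlib
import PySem

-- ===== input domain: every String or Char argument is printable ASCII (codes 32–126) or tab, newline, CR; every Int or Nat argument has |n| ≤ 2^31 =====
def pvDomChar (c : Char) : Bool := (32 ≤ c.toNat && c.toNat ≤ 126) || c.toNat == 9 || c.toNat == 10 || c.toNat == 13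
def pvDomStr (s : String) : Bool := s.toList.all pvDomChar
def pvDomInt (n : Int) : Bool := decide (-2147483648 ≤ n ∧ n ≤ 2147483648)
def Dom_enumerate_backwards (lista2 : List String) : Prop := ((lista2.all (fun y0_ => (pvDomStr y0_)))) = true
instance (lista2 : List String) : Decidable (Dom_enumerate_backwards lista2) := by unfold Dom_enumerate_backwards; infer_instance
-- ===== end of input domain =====

-- B traverses the list in reverse with a countdown index and builds the output back-to-front (alternative decomposition; same cost).

-- ===== PORT A =====
-- A: one forward loop, appending "{indice}. {string[::-1]}" and bumping indice only for truthy strings.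
def enumerate_backwards (lista2 : List String) : List String :=
  (lista2.foldl
    (fun (st : List String × Int) (string : String) =>
      if string ≠ "" then
        let string_rev : String := (PySem.Str.slice? string none none (-1)).getD ""
        (st.1 ++ [PySem.Int.toStr st.2 ++ ". " ++ string_rev], st.2 + 1)
      else st)
    ([], 0)).1

-- ===== PORT B =====
-- B: idx = number of non-empty strings; loop over reversed(lista2) decrementing idx,
-- appending formatted lines; final out.reverse().
def enumerate_backwards_alt (lista2 : List String) : List String :=
  let idx : Int := ((lista2.filter (fun s => s ≠ "")).length : Int)  -- sum(1 for s in lista2 if s)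
  ((lista2.reverse.foldl
    (fun (st : Int × List String) (s : String) =>
      if s ≠ "" then
        (st.1 - 1, st.2 ++ [PySem.Int.toStr (st.1 - 1) ++ ". " ++ (PySem.Str.slice? s none none (-1)).getD ""])
      else st)
    (idx, [])).2).reverse

-- ===== PRECONDITION & SPEC =====
def Spec_enumerate_backwards (lista2 : List String) (out : List String) : Prop := out = enumerate_backwards_alt lista2
instance (lista2 : List String) (out : List String) : Decidable (Spec_enumerate_backwards lista2 out) := by unfold Spec_enumerate_backwards; infer_instance

-- ===== CLAIM (what is proved, stated in full; the proofs are below) =====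
def Claim_equal_enumerate_backwards : Prop := ∀ (lista2 : List String), Dom_enumerate_backwards lista2 → Spec_enumerate_backwards lista2 (enumerate_backwards lista2)

-- ===== LEMMAS AND PROOFS =====

-- Common target: the forward-order enumerate-formatted list starting at index i.
def pvTarget (l : List String) (i : Int) : List String :=
  (PySem.List.enumerate ((l.filter (fun s => s ≠ "")).map
      (fun s => (PySem.Str.slice? s none none (-1)).getD "")) i).map
    (fun p => PySem.Int.toStr p.1 ++ ". " ++ p.2)

-- A's loop invariant: from (acc, i) it produces acc ++ target starting at i.
theorem enumerate_backwards_fold_eq (l : List String) (acc : List String) (i : Int) :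
    (l.foldl
      (fun (st : List String × Int) (string : String) =>
        if string ≠ "" then
          let string_rev : String := (PySem.Str.slice? string none none (-1)).getD ""
          (st.1 ++ [PySem.Int.toStr st.2 ++ ". " ++ string_rev], st.2 + 1)
        else st)
      (acc, i)).1 = acc ++ pvTarget l i := by
  induction l generalizing acc i with
  | nil => simp [pvTarget, PySem.List.enumerate_nil]
  | cons s t ih =>
    simp only [List.foldl_cons]
    by_cases hs : s = ""
    · rw [if_neg (by simp [hs])]; rw [ih]; simp [pvTarget, hs]
    · rw [if_pos hs]; rw [ih]; simp [pvTarget, hs, PySem.List.enumerate_cons]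

-- B's loop invariant: folding over l.reverse from (i + cnt l, acc) ends at (i, acc ++ (target l i).reverse).
theorem enumerate_backwards_alt_fold_eq (l : List String) (acc : List String) (i : Int) :
    l.reverse.foldl
      (fun (st : Int × List String) (s : String) =>
        if s ≠ "" then
          (st.1 - 1, st.2 ++ [PySem.Int.toStr (st.1 - 1) ++ ". " ++ (PySem.Str.slice? s none none (-1)).getD ""])
        else st)
      (i + ((l.filter (fun s => s ≠ "")).length : Int), acc)
    = (i, acc ++ (pvTarget l i).reverse) := by
  induction l generalizing acc i with
  | nil => simp [pvTarget, PySem.List.enumerate_nil]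
  | cons s t ih =>
    simp only [List.reverse_cons, List.foldl_append, List.foldl_cons, List.foldl_nil]
    by_cases hs : s = ""
    · have hcnt : ((s :: t).filter (fun x => x ≠ "")).length = (t.filter (fun x => x ≠ "")).length := by
        simp [hs]
      rw [hcnt, ih]
      rw [if_neg (by simp [hs])]
      simp [pvTarget, hs]
    · have hcnt : (((s :: t).filter (fun x => x ≠ "")).length : Int)
          = (t.filter (fun x => x ≠ "")).length + 1 := by
        simp [hs]
      rw [show i + (((s :: t).filter (fun x => x ≠ "")).length : Int)
            = (i + 1) + ((t.filter (fun x => x ≠ "")).length : Int) by rw [hcnt]; ring]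
      rw [ih]
      rw [if_pos hs]
      simp [pvTarget, hs, PySem.List.enumerate_cons]

-- ===== VERDICT (by name: the statement is the Claim_ definition above) =====
theorem enumerate_backwards_spec : Claim_equal_enumerate_backwards := by
  intro lista2 _
  unfold Spec_enumerate_backwards enumerate_backwards enumerate_backwards_alt
  have hB := enumerate_backwards_alt_fold_eq lista2 [] 0
  rw [zero_add] at hB
  simp only [hB]
  simpa using enumerate_backwards_fold_eq lista2 [] 0
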